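-- pv_equiv track=rewrite | github.com/CcQunResearch/YoGGa | ConstructDataset/utils.py | nested_sort
-- ===== SOURCE A (Python) =====
-- def nested_sort(words):
--     # 对列表进行排序，按长度降序
--     words.sort(key=len, reverse=True)
--
--     result = []
--
--     while words:
--         word = words.pop(0)
--         # 将当前词加入结果列表
--         result.append(word)
--         # 去掉被当前词包含的词
--         words = [w for w in words if word not in w]
--
--     return result
-- ===== SOURCE B (Python) =====
-- def nested_sort(words):
--     # Stable sort by length descending, then one-pass dedup keeping first occurrences.
--     # (Return-value equivalent to A; unlike A it does not mutate the argument list.)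
--     seen = set()
--     result = []
--     for w in sorted(words, key=len, reverse=True):
--         if w not in seen:
--             seen.add(w)
--             result.append(w)
--     return result
-- ===== Notes on version B (the rewrite author's own statement) =====
-- stated objective: faster
-- what changed: Replaces A's quadratic pop-the-head-and-filter-the-rest loop (whose substring test degenerates to equality on a length-sorted list) by one stable sort by length descending followed by a single-pass dedup with a seen set.
import Mathlib
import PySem

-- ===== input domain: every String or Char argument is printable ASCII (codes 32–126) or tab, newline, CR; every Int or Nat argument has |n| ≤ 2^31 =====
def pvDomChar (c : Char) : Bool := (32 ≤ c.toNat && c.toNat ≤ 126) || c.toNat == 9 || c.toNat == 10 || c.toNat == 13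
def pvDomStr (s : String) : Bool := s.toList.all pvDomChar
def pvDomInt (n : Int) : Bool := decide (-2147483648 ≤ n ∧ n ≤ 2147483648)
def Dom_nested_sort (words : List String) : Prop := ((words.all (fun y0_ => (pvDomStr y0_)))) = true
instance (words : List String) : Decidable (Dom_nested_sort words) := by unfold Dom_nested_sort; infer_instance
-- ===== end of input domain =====

-- B replaces A's quadratic pop-and-filter loop by a stable length-descending sort plus a
-- one-pass seen-set dedup (objective: faster). Equivalence is about the RETURN value only:
-- A mutates its argument list (sorts it in place and pops its head), B does not.


-- ===== PORT A =====
-- the 'while words:' loop: pop the head, append it, drop every remaining word that contains it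
def nestedLoopA : List String → List String → List String
  | [], result => result
  | word :: rest, result =>
      nestedLoopA (rest.filter (fun w => !(PySem.Str.isIn word w))) (result ++ [word])
termination_by ws _ => ws.length
decreasing_by
  simp only [List.length_cons, List.length_unattach]
  exact Nat.lt_succ_of_le (le_trans (List.length_filter_le _ _) (by simp))

def nested_sort (words : List String) : List String :=
  nestedLoopA (PySem.List.sorted words (fun w => PySem.Str.len w) true) []

-- ===== PORT B =====
def nested_sort_alt (words : List String) : List String :=
  ((PySem.List.sorted words (fun w => PySem.Str.len w) true).foldl
    (fun (st : PySem.Set String × List String) w =>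
      if st.1.contains w then st else (st.1.add w, st.2 ++ [w]))
    (PySem.Set.empty, [])).2

-- ===== PRECONDITION & SPEC =====
def Spec_nested_sort (words : List String) (out : List String) : Prop := out = nested_sort_alt words
instance (words : List String) (out : List String) : Decidable (Spec_nested_sort words out) := by unfold Spec_nested_sort; infer_instance

-- ===== CLAIM (what is proved, stated in full; the proofs are below) =====
def Claim_equal_nested_sort : Prop := ∀ (words : List String), Dom_nested_sort words → Spec_nested_sort words (nested_sort words)

-- ===== LEMMAS AND PROOFS =====

-- first-occurrence dedup by repeated filtering (the shape A's loop degenerates to on a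
-- length-descending list)
def dedupF : List String → List String
  | [] => []
  | w :: rest => w :: dedupF (rest.filter (fun x => !(x == w)))
termination_by ws => ws.length
decreasing_by
  simp only [List.length_cons, List.length_unattach]
  exact Nat.lt_succ_of_le (le_trans (List.length_filter_le _ _) (by simp))

-- B's fold keeps its two components equal, both being the running seen set
theorem foldB_eq (xs : List String) (s : PySem.Set String) :
    xs.foldl (fun (st : PySem.Set String × List String) w =>
      if st.1.contains w then st else (st.1.add w, st.2 ++ [w])) (s, s)
      = (xs.foldl PySem.Set.add s, xs.foldl PySem.Set.add s) := by
  induction xs generalizing s with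
  | nil => rfl
  | cons w rest ih =>
      have hstep : (if PySem.Set.contains s w then (s, (s : List String)) else (s.add w, s ++ [w]))
          = ((s.add w : PySem.Set String), (s.add w : List String)) := by
        simp only [PySem.Set.add]
        split <;> rfl
      simp only [List.foldl_cons, hstep, ih]

-- peeling one element off PySem.Set.ofList
theorem ofList_cons_filter (w : String) (l : List String) :
    PySem.Set.ofList (w :: l) = w :: (PySem.Set.ofList l).filter (fun y => !(y == w)) := by
  have h := PySem.Set.update_eq_append_filter [w] l
  simp only [PySem.Set.update, PySem.Set.ofList_eq_foldl] at *
  have h1 : PySem.Set.add [] w = [w] := rfl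
  rw [List.foldl_cons, h1, h]
  simp only [List.singleton_append, List.cons.injEq, true_and]
  apply List.filter_congr
  intro a _
  cases h : a == w <;> simp_all [PySem.Set.contains]

-- ofList commutes with filter
theorem ofList_filter (p : String → Bool) (xs : List String) :
    PySem.Set.ofList (xs.filter p) = (PySem.Set.ofList xs).filter p := by
  induction xs with
  | nil => rfl
  | cons w rest ih =>
      by_cases hp : p w = true
      · rw [List.filter_cons_of_pos hp, ofList_cons_filter, ofList_cons_filter, ih,
          List.filter_cons_of_pos hp, List.filter_filter, List.filter_filter]
        congr 1
        apply List.filter_congr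
        intro a _
        cases h : (a == w) <;> simp [Bool.and_comm]
      · rw [List.filter_cons_of_neg hp, ofList_cons_filter, List.filter_cons_of_neg hp, ih,
          List.filter_filter]
        apply List.filter_congr
        intro a _
        cases h : (a == w)
        · simp
        · have ha : a = w := eq_of_beq h
          subst ha
          simp [hp]

theorem dedupF_eq_ofList : ∀ (n : Nat) (xs : List String), xs.length = n →
    dedupF xs = PySem.Set.ofList xs := by
  intro n
  induction n using Nat.strong_induction_on with
  | _ n ih =>
    intro xs hn
    cases xs with
    | nil => rw [dedupF]; rfl
    | cons w rest =>
        have hlt : (rest.filter (fun x => !(x == w))).length < n := by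
          subst hn
          simp only [List.length_cons]
          exact Nat.lt_succ_of_le (List.length_filter_le _ _)
        rw [dedupF, ofList_cons_filter, ih _ hlt _ rfl, ofList_filter]

-- on a length-descending list, "word in w" for a later w just means w = word,
-- so A's loop is first-occurrence dedup
theorem loopA_eq_dedupF : ∀ (n : Nat) (xs : List String), xs.length = n →
    xs.Pairwise (fun a b => PySem.Str.len b ≤ PySem.Str.len a) →
    ∀ (acc : List String), nestedLoopA xs acc = acc ++ dedupF xs := by
  intro n
  induction n using Nat.strong_induction_on with
  | _ n ih =>
    intro xs hn hs acc
    cases xs with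
    | nil => rw [nestedLoopA, dedupF]; simp
    | cons word rest =>
        have hpair := List.pairwise_cons.mp hs
        have hfe : rest.filter (fun w => !(PySem.Str.isIn word w))
            = rest.filter (fun x => !(x == word)) := by
          apply List.filter_congr
          intro w hw
          have hlen : PySem.Str.len w ≤ PySem.Str.len word := hpair.1 w hw
          congr 1
          by_cases he : w = word
          · subst he
            rw [show PySem.Str.isIn w w = true from
                (PySem.Str.isIn_iff_infix w w).mpr (List.infix_refl _)]
            simp
          · have hf : PySem.Str.isIn word w = false := by
              cases h : PySem.Str.isIn word w
              · rfl
              · exfalso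
                have hinf := (PySem.Str.isIn_iff_infix word w).mp h
                have h1 : word.toList.length ≤ w.toList.length := hinf.length_le
                have h2 : (PySem.Str.len w : Int) = w.toList.length := by
                  simp [PySem.Str.len]
                have h3 : (PySem.Str.len word : Int) = word.toList.length := by
                  simp [PySem.Str.len]
                have hlen' : w.toList.length ≤ word.toList.length := by
                  rw [h2, h3] at hlen
                  exact_mod_cast hlen
                have heqlist : word.toList = w.toList := hinf.eq_of_length (by omega)
                exact he (String.toList_inj.mp heqlist.symm)
            rw [hf, show (w == word) = false from beq_eq_false_iff_ne.mpr he]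
        have hlt : (rest.filter (fun x => !(x == word))).length < n := by
          subst hn
          simp only [List.length_cons]
          exact Nat.lt_succ_of_le (List.length_filter_le _ _)
        have hs' : (rest.filter (fun x => !(x == word))).Pairwise
            (fun a b => PySem.Str.len b ≤ PySem.Str.len a) :=
          hpair.2.sublist List.filter_sublist
        rw [nestedLoopA, hfe, ih _ hlt _ rfl hs' _, dedupF]
        simp

-- ===== VERDICT (by name: the statement is the Claim_ definition above) =====
theorem nested_sort_spec : Claim_equal_nested_sort := by
  intro words _
  unfold Spec_nested_sort nested_sort nested_sort_alt
  have hsorted := PySem.List.sorted_pairwise_rev words (fun w => PySem.Str.len w)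
  rw [loopA_eq_dedupF _ _ rfl hsorted [], List.nil_append, dedupF_eq_ofList _ _ rfl]
  rw [show ((PySem.Set.empty : PySem.Set String), ([] : List String))
      = ((([] : PySem.Set String)), (([] : PySem.Set String) : List String)) from rfl,
    foldB_eq, ← PySem.Set.ofList_eq_foldl]
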